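-- pv_equiv track=rewrite | github.com/harshilpatel984/DSA | Array/array_move_negative_number.py | move_negative_number
-- ===== SOURCE A (Python) =====
-- def move_negative_number(arr):
--     positive_arr = []
--     negative_arr = []
--     for i in range(len(arr)):
--         if arr[i] <=0:
--             negative_arr.append(arr[i])
--         else:
--             positive_arr.append(arr[i])
--
--     return negative_arr+positive_arr
-- ===== SOURCE B (Python) =====
-- def move_negative_number(arr):
--     # Stable sort on the boolean key "x > 0": non-positives (key False) keep
--     # their relative order and precede positives (key True).
--     return sorted(arr, key=lambda x: x > 0)
-- ===== Notes on version B (the rewrite author's own statement) =====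
-- stated objective: idiomatic
-- what changed: Replaced the two explicit bucket lists and the index loop with a single stable sort keyed on the boolean predicate x > 0.
import Mathlib
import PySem

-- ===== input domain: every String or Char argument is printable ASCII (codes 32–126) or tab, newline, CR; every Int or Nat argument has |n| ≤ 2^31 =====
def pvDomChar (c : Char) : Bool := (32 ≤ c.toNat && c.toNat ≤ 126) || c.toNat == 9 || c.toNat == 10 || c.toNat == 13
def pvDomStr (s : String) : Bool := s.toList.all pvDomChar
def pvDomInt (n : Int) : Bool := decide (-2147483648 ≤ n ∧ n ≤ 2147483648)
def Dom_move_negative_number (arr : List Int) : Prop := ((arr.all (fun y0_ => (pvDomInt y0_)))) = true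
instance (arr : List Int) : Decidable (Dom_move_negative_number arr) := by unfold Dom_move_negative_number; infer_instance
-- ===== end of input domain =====

-- B replaces A's two explicit bucket lists and index loop with one stable sort keyed on "x > 0" (idiomatic, not faster).


-- ===== PORT A =====
-- 'for i in range(len(arr))' with arr[i]: the loop indices are always in range, so pyGetD's default is never used.
def move_negative_number (arr : List Int) : List Int :=
  let st := (PySem.List.pyRange 0 (PySem.List.len arr)).foldl
    (fun (st : List Int × List Int) i =>
      let x := PySem.List.pyGetD arr i 0
      if x ≤ 0 then (st.1, st.2 ++ [x]) else (st.1 ++ [x], st.2))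
    (([], []) : List Int × List Int)
  st.2 ++ st.1

-- ===== PORT B =====
-- sorted(arr, key=lambda x: x > 0): Python's bool key False/True ported as Int 0/1.
def move_negative_number_alt (arr : List Int) : List Int :=
  PySem.List.sorted arr (fun x => if x > 0 then (1 : Int) else 0)

-- ===== PRECONDITION & SPEC =====
def Spec_move_negative_number (arr : List Int) (out : List Int) : Prop := out = move_negative_number_alt arr
instance (arr : List Int) (out : List Int) : Decidable (Spec_move_negative_number arr out) := by unfold Spec_move_negative_number; infer_instance

-- ===== CLAIM (what is proved, stated in full; the proofs are below) =====
def Claim_equal_move_negative_number : Prop := ∀ (arr : List Int), Dom_move_negative_number arr → Spec_move_negative_number arr (move_negative_number arr)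

-- ===== LEMMAS AND PROOFS =====

def pvKey (x : Int) : Int := if x > 0 then 1 else 0
def pvBef (a b : Int) : Bool := decide (pvKey a < pvKey b)

theorem pv_insertBy_nonpos (x : Int) (hx : x ≤ 0) :
    ∀ (N P : List Int), (∀ n ∈ N, n ≤ 0) → (∀ p ∈ P, 0 < p) →
    PySem.List.insertBy pvBef x (N ++ P) = N ++ x :: P := by
  intro N
  induction N with
  | nil =>
    intro P _ hP
    cases P with
    | nil => rfl
    | cons p ps =>
      have hp : 0 < p := hP p (List.mem_cons_self ..)
      simp [PySem.List.insertBy, pvBef, pvKey, hp, not_lt.mpr hx]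
  | cons n ns ih =>
    intro P hN hP
    have hn : n ≤ 0 := hN n (List.mem_cons_self ..)
    have : pvBef x n = false := by
      simp [pvBef, pvKey, not_lt.mpr hx, not_lt.mpr hn]
    simp [PySem.List.insertBy, this, ih P (fun m hm => hN m (List.mem_cons_of_mem _ hm)) hP]

theorem pv_insertBy_pos (x : Int) (hx : 0 < x) (L : List Int) :
    PySem.List.insertBy pvBef x L = L ++ [x] := by
  apply PySem.List.insertBy_of_forall_not_before
  intro y _
  simp [pvBef, pvKey, hx]
  split <;> omega

theorem pv_sorted_fold (xs : List Int) :
    ∀ (N P : List Int), (∀ n ∈ N, n ≤ 0) → (∀ p ∈ P, 0 < p) →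
    xs.foldl (fun acc x => PySem.List.insertBy pvBef x acc) (N ++ P)
      = (N ++ xs.filter (fun x => decide (x ≤ 0))) ++ (P ++ xs.filter (fun x => decide (0 < x))) := by
  induction xs with
  | nil => intro N P _ _; simp
  | cons x xs ih =>
    intro N P hN hP
    simp only [List.foldl_cons]
    by_cases hx : x ≤ 0
    · rw [pv_insertBy_nonpos x hx N P hN hP]
      have : N ++ x :: P = (N ++ [x]) ++ P := by simp
      rw [this, ih (N ++ [x]) P
        (by intro n hn; rcases List.mem_append.1 hn with h | h
            · exact hN n h
            · simp at h; omega)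
        hP]
      simp [hx, not_lt.mpr hx]
    · have hx' : 0 < x := by omega
      rw [pv_insertBy_pos x hx' (N ++ P), List.append_assoc,
        ih N (P ++ [x]) hN
        (by intro p hp; rcases List.mem_append.1 hp with h | h
            · exact hP p h
            · simp at h; omega)]
      simp [hx, hx']

theorem pv_A_fold (xs : List Int) :
    ∀ (pos neg : List Int),
    xs.foldl (fun (st : List Int × List Int) x =>
        if x ≤ 0 then (st.1, st.2 ++ [x]) else (st.1 ++ [x], st.2)) (pos, neg)
      = (pos ++ xs.filter (fun x => decide (0 < x)), neg ++ xs.filter (fun x => decide (x ≤ 0))) := by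
  induction xs with
  | nil => intro pos neg; simp
  | cons x xs ih =>
    intro pos neg
    by_cases hx : x ≤ 0
    · simp [hx, not_lt.mpr hx, ih]
    · have hx' : 0 < x := by omega
      simp [hx, hx', ih]

-- ===== VERDICT (by name: the statement is the Claim_ definition above) =====
theorem move_negative_number_spec : Claim_equal_move_negative_number := by
  intro arr _
  show move_negative_number arr = move_negative_number_alt arr
  unfold move_negative_number move_negative_number_alt
  rw [show (fun x : Int => if x > 0 then (1 : Int) else 0) = pvKey from rfl,
    PySem.List.sorted_eq_foldl_insertBy]
  have hB := pv_sorted_fold arr [] [] (by simp) (by simp)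
  simp only [List.nil_append] at hB
  have hA : (PySem.List.pyRange 0 (PySem.List.len arr)).foldl
      (fun (st : List Int × List Int) i =>
        let x := PySem.List.pyGetD arr i 0
        if x ≤ 0 then (st.1, st.2 ++ [x]) else (st.1 ++ [x], st.2))
      (([], []) : List Int × List Int)
      = arr.foldl (fun (st : List Int × List Int) x =>
        if x ≤ 0 then (st.1, st.2 ++ [x]) else (st.1 ++ [x], st.2)) ([], []) := by
    simpa using PySem.List.foldl_pyRange_pyGetD arr 0
      (fun (st : List Int × List Int) x =>
        if x ≤ 0 then (st.1, st.2 ++ [x]) else (st.1 ++ [x], st.2)) ([], []) (le_refl 0)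
  rw [show (fun a b => decide (pvKey a < pvKey b)) = pvBef from rfl, hB, hA,
    pv_A_fold arr [] []]
  simp
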